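-- pv_equiv track=rewrite | github.com/pablodarius/mod02_pyhton_course | Python Exercises/3_question4.py | lowercase_first
-- ===== SOURCE A (Python) =====
-- def lowercase_first(s1):
--     upper = ""
--     lower = ""
--     for s in s1:
--         if s.islower():
--             lower += s
--         if s.isupper():
--             upper += s
--
--     return lower + upper
-- ===== SOURCE B (Python) =====
-- def lowercase_first(s1):
--     filtered = [c for c in s1 if c.islower() or c.isupper()]
--     return ''.join(sorted(filtered, key=lambda c: c.isupper()))
-- ===== Notes on version B (the rewrite author's own statement) =====
-- stated objective: alternative
-- what changed: Replaces A's two-accumulator partition loop with a filter followed by a stable sort keyed on isupper (False before True), relying on sort stability to keep each group's original order.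
import Mathlib
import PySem

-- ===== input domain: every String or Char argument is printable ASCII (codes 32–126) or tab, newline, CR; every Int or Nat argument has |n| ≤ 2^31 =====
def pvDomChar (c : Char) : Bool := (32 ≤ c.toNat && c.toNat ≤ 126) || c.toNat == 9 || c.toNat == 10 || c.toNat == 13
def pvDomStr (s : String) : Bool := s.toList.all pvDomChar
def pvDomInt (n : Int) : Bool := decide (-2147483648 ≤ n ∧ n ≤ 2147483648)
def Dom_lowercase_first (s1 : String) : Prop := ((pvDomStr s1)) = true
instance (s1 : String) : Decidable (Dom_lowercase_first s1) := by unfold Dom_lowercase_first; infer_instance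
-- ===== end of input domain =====

-- B replaces A's two-accumulator partition loop with filter-then-stable-sort keyed on isupper; alternative decomposition, same result.

-- ===== PORT A =====
-- loop over the characters keeping two accumulators (lower, upper), then concatenate
def lowercase_first (s1 : String) : String :=
  let acc := s1.toList.foldl
    (fun (acc : List Char × List Char) s =>
      let acc := if PySem.Chars.islower s then (acc.1 ++ [s], acc.2) else acc
      if PySem.Chars.isupper s then (acc.1, acc.2 ++ [s]) else acc)
    ([], [])
  String.mk (acc.1 ++ acc.2)

-- ===== PORT B =====
-- filter the cased characters, then stable-sort by the isupper key (Python's False < True, ported as 0 < 1)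
def lowercase_first_alt (s1 : String) : String :=
  let filtered := s1.toList.filter (fun c => PySem.Chars.islower c || PySem.Chars.isupper c)
  String.mk (PySem.List.sorted filtered (fun c => if PySem.Chars.isupper c then (1 : Nat) else 0) false)

-- ===== PRECONDITION & SPEC =====
def Spec_lowercase_first (s1 : String) (out : String) : Prop := out = lowercase_first_alt s1
instance (s1 : String) (out : String) : Decidable (Spec_lowercase_first s1 out) := by unfold Spec_lowercase_first; infer_instance

-- ===== CLAIM (what is proved, stated in full; the proofs are below) =====
def Claim_equal_lowercase_first : Prop := ∀ (s1 : String), Dom_lowercase_first s1 → Spec_lowercase_first s1 (lowercase_first s1)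

-- ===== LEMMAS AND PROOFS =====

-- the isupper key used by B's sort
def pvKey (c : Char) : Nat := if PySem.Chars.isupper c then 1 else 0
def pvBefore (a b : Char) : Bool := decide (pvKey a < pvKey b)

lemma pv_not_both (c : Char) (h : PySem.Chars.islower c = true) : PySem.Chars.isupper c = false := by
  simp [PySem.Chars.islower, PySem.Chars.isupper, Char.le_def,
    UInt32.le_iff_toNat_le] at *
  omega

lemma pvBefore_low_low (x y : Char) (hy : PySem.Chars.islower y = true) :
    pvBefore x y = false := by
  simp [pvBefore, pvKey, pv_not_both y hy]

lemma pvBefore_low_up (x y : Char) (hx : PySem.Chars.islower x = true)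
    (hy : PySem.Chars.isupper y = true) : pvBefore x y = true := by
  simp [pvBefore, pvKey, pv_not_both x hx, hy]

lemma pvBefore_up (x y : Char) (hx : PySem.Chars.isupper x = true) :
    pvBefore x y = false := by
  simp only [pvBefore, pvKey, hx, if_true]
  split <;> simp

-- inserting a lowercase char into a (lowers ++ uppers) list puts it between the groups
lemma pv_insert_low (x : Char) (hx : PySem.Chars.islower x = true) :
    ∀ (L U : List Char), (∀ c ∈ L, PySem.Chars.islower c = true) →
      (∀ c ∈ U, PySem.Chars.isupper c = true) →
      PySem.List.insertBy pvBefore x (L ++ U) = (L ++ [x]) ++ U := by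
  intro L
  induction L with
  | nil =>
      intro U _ hU
      cases U with
      | nil => simp [PySem.List.insertBy]
      | cons u us =>
          simp only [List.nil_append]
          simp [PySem.List.insertBy, pvBefore_low_up x u hx (hU u (by simp))]
  | cons l ls ih =>
      intro U hL hU
      simp only [List.cons_append, PySem.List.insertBy,
        pvBefore_low_low x l (hL l (by simp))]
      simp [ih U (fun c hc => hL c (by simp [hc])) hU]

-- inserting an uppercase char appends it at the end
lemma pv_insert_up (x : Char) (hx : PySem.Chars.isupper x = true) (ys : List Char) :
    PySem.List.insertBy pvBefore x ys = ys ++ [x] :=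
  PySem.List.insertBy_of_forall_not_before pvBefore x ys (fun y _ => pvBefore_up x y hx)

-- the insertion-sort fold over cased characters builds (lowers ++ uppers)
lemma pv_foldl_ins (xs : List Char) :
    ∀ (L U : List Char), (∀ c ∈ L, PySem.Chars.islower c = true) →
      (∀ c ∈ U, PySem.Chars.isupper c = true) →
      (∀ c ∈ xs, PySem.Chars.islower c = true ∨ PySem.Chars.isupper c = true) →
      xs.foldl (fun acc x => PySem.List.insertBy pvBefore x acc) (L ++ U)
        = (L ++ xs.filter PySem.Chars.islower) ++ (U ++ xs.filter PySem.Chars.isupper) := by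
  induction xs with
  | nil => intro L U _ _ _; simp
  | cons x xs ih =>
      intro L U hL hU hxs
      rcases hxs x (by simp) with hx | hx
      · have step := pv_insert_low x hx L U hL hU
        simp only [List.foldl_cons, step]
        rw [ih (L ++ [x]) U
          (by intro c hc; rcases List.mem_append.1 hc with h | h
              · exact hL c h
              · simp at h; subst h; exact hx) hU
          (fun c hc => hxs c (by simp [hc]))]
        simp [hx, pv_not_both x hx]
      · have hnl : PySem.Chars.islower x = false := by
          cases h : PySem.Chars.islower x
          · rfl
          · rw [pv_not_both x h] at hx; exact absurd hx (by simp)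
        simp only [List.foldl_cons, ← List.append_assoc, pv_insert_up x hx (L ++ U)]
        rw [List.append_assoc, ih L (U ++ [x]) hL
          (by intro c hc; rcases List.mem_append.1 hc with h | h
              · exact hU c h
              · simp at h; subst h; exact hx)
          (fun c hc => hxs c (by simp [hc]))]
        simp [hx, hnl]

-- A's fold with two accumulators computes the same partition
lemma pv_foldA (xs : List Char) :
    ∀ (l u : List Char),
      xs.foldl
        (fun (acc : List Char × List Char) s =>
          let acc := if PySem.Chars.islower s then (acc.1 ++ [s], acc.2) else acc
          if PySem.Chars.isupper s then (acc.1, acc.2 ++ [s]) else acc)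
        (l, u)
        = (l ++ xs.filter PySem.Chars.islower, u ++ xs.filter PySem.Chars.isupper) := by
  induction xs with
  | nil => intro l u; simp
  | cons x xs ih =>
      intro l u
      simp only [List.foldl_cons, List.filter_cons]
      cases hlo : PySem.Chars.islower x
      · cases hup : PySem.Chars.isupper x <;> simp [ih]
      · simp [pv_not_both x hlo, ih]

lemma pv_filter_filter (xs : List Char) :
    (xs.filter (fun c => PySem.Chars.islower c || PySem.Chars.isupper c)).filter
        PySem.Chars.islower = xs.filter PySem.Chars.islower := by
  rw [List.filter_filter]
  apply List.filter_congr
  intro c _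
  cases h : PySem.Chars.islower c <;> simp_all

lemma pv_filter_filter_up (xs : List Char) :
    (xs.filter (fun c => PySem.Chars.islower c || PySem.Chars.isupper c)).filter
        PySem.Chars.isupper = xs.filter PySem.Chars.isupper := by
  rw [List.filter_filter]
  apply List.filter_congr
  intro c _
  cases h : PySem.Chars.isupper c <;> simp_all

-- ===== VERDICT (by name: the statement is the Claim_ definition above) =====
theorem lowercase_first_spec : Claim_equal_lowercase_first := by
  intro s1 _
  simp only [Spec_lowercase_first, lowercase_first, lowercase_first_alt]
  rw [PySem.List.sorted_eq_foldl_insertBy]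
  have hB := pv_foldl_ins
    (s1.toList.filter (fun c => PySem.Chars.islower c || PySem.Chars.isupper c)) [] []
    (by simp) (by simp)
    (by intro c hc
        have := List.of_mem_filter hc
        rcases Bool.or_eq_true_iff.1 this with h | h
        · exact Or.inl h
        · exact Or.inr h)
  simp only [List.nil_append] at hB
  have hBe : (fun acc x => PySem.List.insertBy (fun a b =>
      decide ((if PySem.Chars.isupper a then (1:Nat) else 0) <
        (if PySem.Chars.isupper b then (1:Nat) else 0))) x acc)
      = (fun acc x => PySem.List.insertBy pvBefore x acc) := by
    funext acc x; rfl
  rw [hBe, hB, pv_filter_filter, pv_filter_filter_up, pv_foldA]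
  simp
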